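-- pv_equiv track=rewrite | github.com/HeckfyVEZA/canal | check_file.py | check
-- ===== SOURCE A (Python) =====
-- def check(all_noms):
--     header = all_noms[0][0]
--     chlist = [[header]]
--     for noms in all_noms:
--         if noms[0] == header:
--             chlist[-1].append(f"{noms[1]} | {noms[2]} шт.")
--         else:
--             header = noms[0]
--             chlist.append([header])
--             chlist[-1].append(f"{noms[1]} | {noms[2]} шт.")
--     max_len = max([len(cist) for cist in chlist])
--     chlist = [cist+[None]*(max_len - len(cist)) for cist in chlist]
--     chlist = list(zip(*chlist))
--     return chlist
-- ===== SOURCE B (Python) =====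
-- def check(all_noms):
--     # Recursive: peel the leading run of equal-key rows into one column,
--     # then merge that column onto the transpose computed recursively for the rest.
--     header = all_noms[0][0]
--     k = 1
--     while k < len(all_noms) and all_noms[k][0] == header:
--         k += 1
--     col = [header] + [f"{r[1]} | {r[2]} шт." for r in all_noms[:k]]
--     if k == len(all_noms):
--         return [(c,) for c in col]
--     rest = check(all_noms[k:])
--     width = len(rest[0])
--     out = []
--     for j in range(max(len(col), len(rest))):
--         left = col[j] if j < len(col) else None
--         right = rest[j] if j < len(rest) else (None,) * width
--         out.append((left,) + right)
--     return out
-- ===== Notes on version B (the rewrite author's own statement) =====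
-- stated objective: alternative
-- what changed: B is recursive: it peels the leading run of equal-key rows into one column and merges that column onto the transpose computed recursively for the remaining rows, never materialising the list of groups, the max-length scan or a padding pass.
import Mathlib
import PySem

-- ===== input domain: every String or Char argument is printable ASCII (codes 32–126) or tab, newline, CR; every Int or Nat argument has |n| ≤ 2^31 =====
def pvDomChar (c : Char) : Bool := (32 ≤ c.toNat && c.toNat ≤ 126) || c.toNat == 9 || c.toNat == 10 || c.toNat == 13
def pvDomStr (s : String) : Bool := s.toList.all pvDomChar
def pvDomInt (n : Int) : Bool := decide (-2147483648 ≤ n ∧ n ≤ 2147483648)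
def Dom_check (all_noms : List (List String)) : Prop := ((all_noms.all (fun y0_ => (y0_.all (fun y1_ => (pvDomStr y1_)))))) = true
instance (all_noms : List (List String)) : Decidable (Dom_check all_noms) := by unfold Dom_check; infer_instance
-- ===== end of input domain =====

-- B is a different decomposition: it recurses run by run, peeling the leading block of
-- equal-key rows into one column and merging that column onto the recursively computed
-- transpose of the remaining rows; no group lists, no max-length scan, no padding pass.

-- ===== PORT A =====
-- noms[0] (junk "" where Python would raise — outside Pre_)
def pvKey (noms : List String) : String := (PySem.List.pyGet? noms 0).getD ""

-- f"{noms[1]} | {noms[2]} шт." (shared by both ports)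
def pvFmt (noms : List String) : String :=
  ((PySem.List.pyGet? noms 1).getD "") ++ " | " ++ ((PySem.List.pyGet? noms 2).getD "") ++ " шт."

-- chlist[-1].append(x)
def pvAppendLast (chlist : List (List String)) (x : String) : List (List String) :=
  match chlist with
  | [] => []
  | [g] => [g ++ [x]]
  | g :: rest => g :: pvAppendLast rest x

-- one iteration of A's for-loop; state = (header, chlist)
def pvStepA (st : String × List (List String)) (noms : List String) : String × List (List String) :=
  if pvKey noms = st.1 then
    (st.1, pvAppendLast st.2 (pvFmt noms))
  else
    (pvKey noms, pvAppendLast (st.2 ++ [[pvKey noms]]) (pvFmt noms))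

-- list(zip(*chlist))
def pvZipStar (ls : List (List (Option String))) : List (List (Option String)) :=
  if h : ls.isEmpty || ls.any List.isEmpty then []
  else (ls.map (fun l => l.headD none)) :: pvZipStar (ls.map List.tail)
termination_by (ls.headD []).length
decreasing_by
  cases ls with
  | nil => simp at h
  | cons a t =>
      simp only [List.isEmpty_cons, List.any_cons, Bool.false_or, Bool.or_eq_true,
        List.isEmpty_iff, List.any_eq_true] at h
      push_neg at h
      simp only [List.map_cons, List.headD_cons]
      cases a with
      | nil => exact absurd rfl h.1
      | cons x xs => simp

def check (all_noms : List (List String)) : List (List (Option String)) :=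
  let header := pvKey ((PySem.List.pyGet? all_noms 0).getD [])
  let st := all_noms.foldl pvStepA (header, [[header]])
  let chlist := st.2
  let max_len := (PySem.List.max? (chlist.map List.length) (fun x => x)).getD 0
  let padded := chlist.map
    (fun cist => cist.map some ++ List.replicate (max_len - cist.length) (none : Option String))
  pvZipStar padded

-- ===== PORT B =====
-- B's while loop: 'while k < len(all_noms) and all_noms[k][0] == header: k += 1'
def pvRunLen (xs : List (List String)) (hdr : String) (k : Nat) : Nat :=
  if h : k < xs.length ∧ pvKey (xs.getD k []) = hdr then pvRunLen xs hdr (k + 1) else k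
termination_by xs.length - k
decreasing_by omega

-- needed for check_alt's termination
theorem pvRunLen_ge (xs : List (List String)) (hdr : String) (k : Nat) :
    k ≤ pvRunLen xs hdr k := by
  fun_induction pvRunLen xs hdr k <;> omega

def check_alt (all_noms : List (List String)) : List (List (Option String)) :=
  let header := pvKey ((PySem.List.pyGet? all_noms 0).getD [])   -- all_noms[0][0]
  let k := pvRunLen all_noms header 1
  let col := header :: (all_noms.take k).map pvFmt
  -- 'k == len(all_noms)': since 1 ≤ k ≤ len on every input Python returns on, '≤' is '=='
  if h : all_noms.length ≤ k then
    col.map (fun c => [some c])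
  else
    let rest := check_alt (all_noms.drop k)
    let width := (rest.headD []).length       -- len(rest[0]); rest is nonempty whenever reached
    (List.range (max col.length rest.length)).map (fun j =>
      col[j]? :: rest.getD j (List.replicate width (none : Option String)))
termination_by all_noms.length
decreasing_by
  have h1 := pvRunLen_ge all_noms (pvKey ((PySem.List.pyGet? all_noms 0).getD [])) 1
  simp only [List.length_drop]
  omega

-- ===== PRECONDITION & SPEC =====
-- Pre_ excludes exactly the inputs where A raises IndexError: the empty list
-- (all_noms[0][0]) and rows with fewer than 3 cells (noms[1]/noms[2]).
def Pre_check (all_noms : List (List String)) : Prop :=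
  all_noms ≠ [] ∧ ∀ noms ∈ all_noms, 3 ≤ noms.length
instance (all_noms : List (List String)) : Decidable (Pre_check all_noms) := by
  unfold Pre_check; infer_instance

def pvWitness_check : List (List String) := [["a", "1", "2"], ["b", "3", "4"]]

def Spec_check (all_noms : List (List String)) (out : List (List (Option String))) : Prop :=
  out = check_alt all_noms
instance (all_noms : List (List String)) (out : List (List (Option String))) : Decidable (Spec_check all_noms out) := by unfold Spec_check; infer_instance

-- ===== CLAIM (what is proved, stated in full; the proofs are below) =====
def Claim_equal_check : Prop := ∀ (all_noms : List (List String)), Dom_check all_noms → Pre_check all_noms → Spec_check all_noms (check all_noms)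

-- ===== LEMMAS AND PROOFS =====

-- A's in-place append to the last group, as "replace the last group by its extension"
theorem pvAppendLast_concat (t : List (List String)) (g : List String) (x : String) :
    pvAppendLast (t ++ [g]) x = t ++ [g ++ [x]] := by
  induction t with
  | nil => rfl
  | cons a t ih =>
      obtain ⟨b, u, hbu⟩ : ∃ b u, t ++ [g] = b :: u := by
        cases h : t ++ [g] with
        | nil => simp at h
        | cons b u => exact ⟨b, u, rfl⟩
      rw [List.cons_append, hbu]
      show a :: pvAppendLast (b :: u) x = _
      rw [← hbu, ih]
      simp

theorem pvAppendLast_snoc (xs : List (List String)) (k : String) (v : String) :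
    pvAppendLast (xs ++ [[k]]) v = xs ++ [[k, v]] := by
  rw [pvAppendLast_concat]
  simp

-- A's grouping loop with an already-closed prefix acc and open group cur, rephrased recursively
def pvConsume (hdr : String) (cur : List String) (rs : List (List String)) : List (List String) :=
  match rs with
  | [] => [cur]
  | r :: rs' =>
      if pvKey r = hdr then pvConsume hdr (cur ++ [pvFmt r]) rs'
      else cur :: pvConsume (pvKey r) [pvKey r, pvFmt r] rs'

theorem pvFoldA_consume (rs : List (List String)) (hdr : String)
    (acc : List (List String)) (cur : List String) :
    (rs.foldl pvStepA (hdr, acc ++ [cur])).2 = acc ++ pvConsume hdr cur rs := by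
  induction rs generalizing hdr acc cur with
  | nil => simp [pvConsume]
  | cons r rs ih =>
      simp only [List.foldl_cons, pvConsume]
      by_cases hk : pvKey r = hdr
      · rw [if_pos hk]
        have hs : pvStepA (hdr, acc ++ [cur]) r = (hdr, acc ++ [cur ++ [pvFmt r]]) := by
          simp [pvStepA, hk, pvAppendLast_concat]
        rw [hs, ih]
      · rw [if_neg hk]
        have hs : pvStepA (hdr, acc ++ [cur]) r
            = (pvKey r, (acc ++ [cur]) ++ [[pvKey r, pvFmt r]]) := by
          simp only [pvStepA, if_neg hk]
          rw [List.append_assoc, ← List.append_assoc, pvAppendLast_snoc]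
        rw [hs, ih]
        simp

-- the while-loop counter k is 1 + the length of the leading equal-key run of the tail
theorem pvRunLen_spec (xs : List (List String)) (hdr : String) (k : Nat) (hk : k ≤ xs.length) :
    pvRunLen xs hdr k = k + ((xs.drop k).takeWhile (fun r => pvKey r == hdr)).length := by
  fun_induction pvRunLen xs hdr k with
  | case1 k h ih =>
      obtain ⟨hlt, hkey⟩ := h
      have hdrop : xs.drop k = xs[k] :: xs.drop (k + 1) := List.drop_eq_getElem_cons hlt
      have hget : xs.getD k [] = xs[k] := by
        rw [List.getD_eq_getElem?_getD, List.getElem?_eq_getElem hlt]; rfl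
      rw [hdrop, List.takeWhile_cons, if_pos (by rw [beq_iff_eq, ← hget]; exact hkey)]
      rw [ih (by omega)]
      simp only [List.length_cons]
      omega
  | case2 k h =>
      rcases Nat.lt_or_ge k xs.length with hlt | hge
      · have hkey : ¬ pvKey (xs.getD k []) = hdr := fun hc => h ⟨hlt, hc⟩
        have hdrop : xs.drop k = xs[k] :: xs.drop (k + 1) := List.drop_eq_getElem_cons hlt
        have hget : xs.getD k [] = xs[k] := by
          rw [List.getD_eq_getElem?_getD, List.getElem?_eq_getElem hlt]; rfl
        rw [hdrop, List.takeWhile_cons, if_neg (by rw [beq_iff_eq, ← hget]; exact hkey)]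
        simp
      · have : xs.drop k = [] := List.drop_eq_nil_of_le hge
        rw [this]
        simp

-- B's recursion, on the groups level (proof-only helper mirroring check_alt's recursion)
def pvGroups (xs : List (List String)) : List (List String) :=
  if h : xs.length ≤ pvRunLen xs (pvKey ((PySem.List.pyGet? xs 0).getD [])) 1 then
    [pvKey ((PySem.List.pyGet? xs 0).getD [])
      :: (xs.take (pvRunLen xs (pvKey ((PySem.List.pyGet? xs 0).getD [])) 1)).map pvFmt]
  else
    (pvKey ((PySem.List.pyGet? xs 0).getD [])
      :: (xs.take (pvRunLen xs (pvKey ((PySem.List.pyGet? xs 0).getD [])) 1)).map pvFmt)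
      :: pvGroups (xs.drop (pvRunLen xs (pvKey ((PySem.List.pyGet? xs 0).getD [])) 1))
termination_by xs.length
decreasing_by
  have h1 := pvRunLen_ge xs (pvKey ((PySem.List.pyGet? xs 0).getD [])) 1
  simp only [List.length_drop]
  omega

theorem pv_take_takeWhile {α : Type} (p : α → Bool) (l : List α) :
    l.take (l.takeWhile p).length = l.takeWhile p := by
  induction l with
  | nil => rfl
  | cons a t ih =>
      rw [List.takeWhile_cons]
      by_cases hp : p a
      · simp [hp, ih]
      · simp [hp]

theorem pv_drop_takeWhile {α : Type} (p : α → Bool) (l : List α) :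
    l.drop (l.takeWhile p).length = l.dropWhile p := by
  induction l with
  | nil => rfl
  | cons a t ih =>
      rw [List.takeWhile_cons, List.dropWhile_cons]
      by_cases hp : p a
      · simp [hp, ih]
      · simp [hp]

-- unrolling pvConsume across the leading run
theorem pvConsume_run (rs : List (List String)) (hdr : String) (pre : List String) :
    pvConsume hdr (hdr :: pre) rs =
      ((hdr :: pre) ++ (rs.takeWhile (fun r => pvKey r == hdr)).map pvFmt) ::
        (match rs.dropWhile (fun r => pvKey r == hdr) with
         | [] => []
         | r' :: rs' => pvConsume (pvKey r') [pvKey r', pvFmt r'] rs') := by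
  induction rs generalizing pre with
  | nil => simp [pvConsume]
  | cons r rs ih =>
      rw [List.takeWhile_cons, List.dropWhile_cons]
      by_cases hk : pvKey r = hdr
      · have hb : (pvKey r == hdr) = true := by rw [beq_iff_eq]; exact hk
        rw [pvConsume, if_pos hk]
        have : (hdr :: pre) ++ [pvFmt r] = hdr :: (pre ++ [pvFmt r]) := by simp
        rw [this, ih]
        simp [hb]
      · have hb : (pvKey r == hdr) = false := by rw [beq_eq_false_iff_ne]; exact hk
        rw [pvConsume, if_neg hk]
        simp [hb]

theorem pvConsume_groups (r : List String) (rs : List (List String)) :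
    pvConsume (pvKey r) [pvKey r, pvFmt r] rs = pvGroups (r :: rs) := by
  induction hn : rs.length using Nat.strong_induction_on generalizing r rs with
  | _ n ih =>
  subst hn
  have hhead : (PySem.List.pyGet? (r :: rs) 0).getD [] = r := by
    simp [PySem.List.pyGet?, PySem.List.pyIdx?]
  have hk1 : pvRunLen (r :: rs) (pvKey r) 1
      = 1 + (rs.takeWhile (fun x => pvKey x == pvKey r)).length := by
    rw [pvRunLen_spec (r :: rs) (pvKey r) 1 (by simp)]
    simp
  have htake : (r :: rs).take (pvRunLen (r :: rs) (pvKey r) 1)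
      = r :: rs.takeWhile (fun x => pvKey x == pvKey r) := by
    rw [hk1, Nat.add_comm, List.take_succ_cons, pv_take_takeWhile]
  have hdroprs : (r :: rs).drop (pvRunLen (r :: rs) (pvKey r) 1)
      = rs.dropWhile (fun x => pvKey x == pvKey r) := by
    rw [hk1, Nat.add_comm, List.drop_succ_cons, pv_drop_takeWhile]
  have hlens : (rs.takeWhile (fun x => pvKey x == pvKey r)).length
      + (rs.dropWhile (fun x => pvKey x == pvKey r)).length = rs.length := by
    have h := List.takeWhile_append_dropWhile (p := fun x => pvKey x == pvKey r) (l := rs)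
    calc (rs.takeWhile (fun x => pvKey x == pvKey r)).length
          + (rs.dropWhile (fun x => pvKey x == pvKey r)).length
        = ((rs.takeWhile (fun x => pvKey x == pvKey r))
            ++ rs.dropWhile (fun x => pvKey x == pvKey r)).length := (List.length_append).symm
      _ = rs.length := by rw [h]
  have hcons : pvKey r :: [pvFmt r] = [pvKey r, pvFmt r] := rfl
  rw [← hcons, pvConsume_run, pvGroups]
  rw [hhead] at *
  cases hd : rs.dropWhile (fun x => pvKey x == pvKey r) with
  | nil =>
      have hle : (r :: rs).length ≤ pvRunLen (r :: rs) (pvKey r) 1 := by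
        rw [hk1]
        simp only [List.length_cons]
        rw [hd] at hlens
        simp at hlens
        omega
      rw [dif_pos hle, htake]
      simp
  | cons r' rs' =>
      have hlt : ¬ (r :: rs).length ≤ pvRunLen (r :: rs) (pvKey r) 1 := by
        rw [hk1]
        simp only [List.length_cons]
        rw [hd] at hlens
        simp only [List.length_cons] at hlens
        omega
      rw [dif_neg hlt, htake, hdroprs, hd]
      simp only [List.cons.injEq]
      refine ⟨by simp, ?_⟩
      exact ih rs'.length (by rw [hd] at hlens; simp at hlens; omega) r' rs' rfl

-- A's fold over a nonempty list produces exactly B's recursive groups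
theorem pvGroupsA_eq (r : List String) (rs : List (List String)) :
    (((r :: rs).foldl pvStepA (pvKey r, [[pvKey r]])).2) = pvGroups (r :: rs) := by
  have hstep : pvStepA (pvKey r, [[pvKey r]]) r = (pvKey r, [[pvKey r, pvFmt r]]) := by
    simp [pvStepA, pvAppendLast]
  rw [List.foldl_cons, hstep]
  have := pvFoldA_consume rs (pvKey r) [] [pvKey r, pvFmt r]
  simp only [List.nil_append] at this
  rw [this, pvConsume_groups]

-- running max over Nat
def pvMaxNat (l : List Nat) : Nat := l.foldl max 0

theorem pvFoldlMax_shift (t : List Nat) (a : Nat) :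
    t.foldl max a = max a (t.foldl max 0) := by
  induction t generalizing a with
  | nil => simp
  | cons x t ih =>
      simp only [List.foldl_cons]
      rw [ih (max a x), ih (max 0 x)]
      omega

theorem pvMaxNat_cons (x : Nat) (t : List Nat) : pvMaxNat (x :: t) = max x (pvMaxNat t) := by
  simp only [pvMaxNat, List.foldl_cons]
  rw [pvFoldlMax_shift]
  omega

theorem pvLe_maxNat (l : List Nat) (x : Nat) (hx : x ∈ l) : x ≤ pvMaxNat l :=
  (PySem.List.le_foldl_max l 0).2 x hx

theorem pvMax?_getD (l : List Nat) :
    (PySem.List.max? l (fun x => x)).getD 0 = pvMaxNat l := by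
  cases l with
  | nil =>
      have h : PySem.List.max? ([] : List Nat) (fun x => x) = none := by
        rw [PySem.List.max?_eq_none_iff]
      rw [h]
      rfl
  | cons x t =>
      rw [PySem.List.max?_id_cons]
      simp only [Option.getD_some, pvMaxNat, List.foldl_cons]
      rw [Nat.zero_max]

def pvMaxLen (G : List (List String)) : Nat := pvMaxNat (G.map List.length)

-- the ragged transpose both programs compute
def pvT (G : List (List String)) : List (List (Option String)) :=
  (List.range (pvMaxLen G)).map (fun i => G.map (fun g => g[i]?))

theorem pvGroups_ne (xs : List (List String)) : pvGroups xs ≠ [] := by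
  rw [pvGroups]
  split <;> simp

theorem pvGroups_mem_ne (xs : List (List String)) :
    ∀ g ∈ pvGroups xs, g ≠ [] := by
  induction hn : xs.length using Nat.strong_induction_on generalizing xs with
  | _ n ih =>
  subst hn
  rw [pvGroups]
  split
  · intro g hg
    simp only [List.mem_singleton] at hg
    subst hg
    simp
  · rename_i h
    intro g hg
    rcases List.mem_cons.mp hg with hg | hg
    · subst hg; simp
    · have h1 := pvRunLen_ge xs (pvKey ((PySem.List.pyGet? xs 0).getD [])) 1
      exact ih _ (by simp only [List.length_drop]; omega) _ rfl g hg

theorem pvMaxLen_pos (xs : List (List String)) : 1 ≤ pvMaxLen (pvGroups xs) := by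
  obtain ⟨g, G, hG⟩ : ∃ g G, pvGroups xs = g :: G := by
    cases h : pvGroups xs with
    | nil => exact absurd h (pvGroups_ne xs)
    | cons g G => exact ⟨g, G, rfl⟩
  have hg : g ≠ [] := pvGroups_mem_ne xs g (by rw [hG]; simp)
  have : 1 ≤ g.length := by
    cases g with
    | nil => exact absurd rfl hg
    | cons a t => simp
  calc 1 ≤ g.length := this
    _ ≤ pvMaxLen (pvGroups xs) :=
        pvLe_maxNat _ _ (by rw [hG]; exact List.mem_map_of_mem (by simp))

-- zip(*ps) on a nonempty rectangle of height m, row by row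
theorem pvZipStar_rect (m : Nat) (ps : List (List (Option String))) (hne : ps ≠ [])
    (hlen : ∀ p ∈ ps, p.length = m) :
    pvZipStar ps = (List.range m).map (fun i => ps.map (fun p => p.getD i none)) := by
  induction m generalizing ps with
  | zero =>
      rw [pvZipStar]
      have : ps.any List.isEmpty = true := by
        cases ps with
        | nil => exact absurd rfl hne
        | cons p t =>
            simp only [List.any_cons, Bool.or_eq_true]
            exact Or.inl (by simpa [List.isEmpty_iff, List.length_eq_zero_iff] using hlen p (by simp))
      simp [this]
  | succ m ih =>
      rw [pvZipStar]
      have h1 : ps.isEmpty = false := by simpa [List.isEmpty_iff] using hne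
      have h2 : ps.any List.isEmpty = false := by
        simp only [List.any_eq_false]
        intro p hp
        have := hlen p hp
        simp [List.isEmpty_iff, List.length_eq_zero_iff] at this ⊢
        intro hnil; rw [hnil] at this; simp at this
      rw [dif_neg (by simp [h1, h2])]
      rw [ih (ps.map List.tail) (by simpa using hne)
        (by intro p hp; simp only [List.mem_map] at hp; obtain ⟨q, hq, rfl⟩ := hp
            have := hlen q hq; simp [List.length_tail, this])]
      rw [List.range_succ_eq_map, List.map_cons, List.map_map]
      congr 1
      · apply List.map_congr_left
        intro p _
        cases p <;> simp
      · apply List.map_congr_left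
        intro i _
        simp only [Function.comp, List.map_map]
        apply List.map_congr_left
        intro p _
        cases p <;> simp

-- a padded cell read inside the rectangle is exactly g[i]?
theorem pvPad_getD (g : List String) (m i : Nat) (hlen : g.length ≤ m) :
    (g.map some ++ List.replicate (m - g.length) (none : Option String)).getD i none
      = g[i]? := by
  induction g generalizing i m with
  | nil => simp [List.getD]
  | cons a t ih =>
      cases i with
      | zero => simp
      | succ j =>
          cases m with
          | zero => simp at hlen
          | succ m' =>
              have : m' + 1 - (a :: t).length = m' - t.length := by
                simp only [List.length_cons]; omega
              rw [this]
              simpa using ih m' j (by simpa using hlen)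

-- A = transpose of the groups
theorem pvCheck_eq_T (r : List String) (rs : List (List String)) :
    check (r :: rs) = pvT (pvGroups (r :: rs)) := by
  have hhead : (PySem.List.pyGet? (r :: rs) 0).getD [] = r := by
    simp [PySem.List.pyGet?, PySem.List.pyIdx?]
  simp only [check, hhead]
  rw [pvGroupsA_eq]
  set G := pvGroups (r :: rs) with hG
  have hGne : G ≠ [] := pvGroups_ne _
  have hmax : (PySem.List.max? (G.map List.length) (fun x => x)).getD 0 = pvMaxLen G := by
    rw [pvMax?_getD]; rfl
  rw [hmax]
  have hbound : ∀ g ∈ G, g.length ≤ pvMaxLen G := by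
    intro g hg
    exact pvLe_maxNat _ _ (List.mem_map_of_mem hg)
  rw [pvZipStar_rect (pvMaxLen G) _ (by simpa using hGne)
      (by intro p hp; simp only [List.mem_map] at hp; obtain ⟨g, hg, rfl⟩ := hp
          have := hbound g hg
          simp only [List.length_append, List.length_map, List.length_replicate]
          omega)]
  unfold pvT
  apply List.map_congr_left
  intro i _
  rw [List.map_map]
  apply List.map_congr_left
  intro g hg
  simpa using pvPad_getD g (pvMaxLen G) i (hbound g hg)

theorem pvT_length (G : List (List String)) : (pvT G).length = pvMaxLen G := by
  simp [pvT]

theorem pvT_getD (G : List (List String)) (j : Nat) (d : List (Option String))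
    (hj : j < pvMaxLen G) :
    (pvT G).getD j d = G.map (fun g => g[j]?) := by
  rw [List.getD_eq_getElem?_getD]
  simp [pvT, List.getElem?_map, List.getElem?_range hj]

theorem pvMap_none_of_ge (G : List (List String)) (j : Nat) (hj : pvMaxLen G ≤ j) :
    G.map (fun g => g[j]?) = List.replicate G.length (none : Option String) := by
  rw [List.eq_replicate_iff]
  refine ⟨by simp, ?_⟩
  intro b hb
  simp only [List.mem_map] at hb
  obtain ⟨g, hg, rfl⟩ := hb
  have : g.length ≤ j := le_trans (pvLe_maxNat _ _ (List.mem_map_of_mem hg)) hj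
  exact List.getElem?_eq_none this

theorem pvT_headD (G : List (List String)) (hpos : 1 ≤ pvMaxLen G) :
    (pvT G).headD [] = G.map (fun g => g[0]?) := by
  unfold pvT
  obtain ⟨m, hm⟩ : ∃ m, pvMaxLen G = m + 1 := ⟨pvMaxLen G - 1, by omega⟩
  rw [hm, List.range_succ_eq_map]
  simp

-- B = transpose of the groups
theorem pvB_T (xs : List (List String)) (hne : xs ≠ []) :
    check_alt xs = pvT (pvGroups xs) := by
  induction hn : xs.length using Nat.strong_induction_on generalizing xs with
  | _ n ih =>
  subst hn
  rw [check_alt, pvGroups]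
  by_cases hle : xs.length ≤ pvRunLen xs (pvKey ((PySem.List.pyGet? xs 0).getD [])) 1
  · rw [dif_pos hle, dif_pos hle]
    set col := pvKey ((PySem.List.pyGet? xs 0).getD [])
      :: (xs.take (pvRunLen xs (pvKey ((PySem.List.pyGet? xs 0).getD [])) 1)).map pvFmt with hcol
    have hmax : pvMaxLen [col] = col.length := by
      simp [pvMaxLen, pvMaxNat]
    refine List.ext_getElem (by simp [pvT, hmax]) ?_
    intro i h1 h2
    have hi : i < col.length := by simpa using h1
    simp [pvT, hmax, List.getElem?_eq_getElem hi]
  · rw [dif_neg hle, dif_neg hle]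
    set H := pvKey ((PySem.List.pyGet? xs 0).getD []) with hH
    set k := pvRunLen xs H 1 with hk
    set col := H :: (xs.take k).map pvFmt with hcol
    have h1 : 1 ≤ k := pvRunLen_ge xs H 1
    have hdne : xs.drop k ≠ [] := by
      intro hc
      have := congrArg List.length hc
      simp only [List.length_drop, List.length_nil] at this
      omega
    have hrest : check_alt (xs.drop k) = pvT (pvGroups (xs.drop k)) :=
      ih (xs.drop k).length (by simp only [List.length_drop]; omega) _ hdne rfl
    rw [hrest]
    set G' := pvGroups (xs.drop k) with hG'
    have hMpos : 1 ≤ pvMaxLen G' := pvMaxLen_pos _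
    have hwidth : ((pvT G').headD []).length = G'.length := by
      rw [pvT_headD G' hMpos]; simp
    have hrlen : (pvT G').length = pvMaxLen G' := pvT_length G'
    have hrow : ∀ j : Nat,
        (pvT G').getD j (List.replicate ((pvT G').headD []).length (none : Option String))
          = G'.map (fun g => g[j]?) := by
      intro j
      by_cases hj : j < pvMaxLen G'
      · exact pvT_getD G' j _ hj
      · rw [List.getD_eq_getElem?_getD, List.getElem?_eq_none (by rw [hrlen]; omega)]
        simp only [Option.getD_none]
        rw [hwidth, pvMap_none_of_ge G' j (by omega)]
    have hmaxc : pvMaxLen (col :: G') = max col.length (pvMaxLen G') := by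
      simp only [pvMaxLen, List.map_cons]
      exact pvMaxNat_cons _ _
    show (List.range (max col.length (pvT G').length)).map
        (fun j => col[j]? :: (pvT G').getD j
          (List.replicate ((pvT G').headD []).length (none : Option String)))
      = (List.range (pvMaxLen (col :: G'))).map (fun i => (col :: G').map (fun g => g[i]?))
    rw [hmaxc, hrlen]
    apply List.map_congr_left
    intro j _
    rw [hrow j]
    simp

-- ===== VERDICT (by name: the statement is the Claim_ definition above) =====
theorem check_spec : Claim_equal_check := by
  intro all_noms _ hpre
  obtain ⟨hne, _⟩ := hpre
  unfold Spec_check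
  cases all_noms with
  | nil => exact absurd rfl hne
  | cons r rs =>
      rw [pvCheck_eq_T, ← pvB_T (r :: rs) (by simp)]
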